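-- pv_equiv track=rewrite | github.com/data-workspaces/data-workspaces-core | dataworkspaces/utils/print_utils.py | pad_left
-- ===== SOURCE A (Python) =====
-- def _truncate(s, width):
--     truncated = False
--     if "\n" in s:
--         s = s[0, s.index("\n")]  # tuncate at the first newline
--         truncated = True
--     if len(s) > (width - 2):
--         s = s[0 : width - 2]
--         truncated = True
--     if truncated:
--         s += ".."
--     return s
--
-- def pad_left(s, width, truncate=False):
--     if truncate:
--         s = _truncate(s, width)
--     if "\n" in s:
--         return "\n".join([pad_left(fragment, width) for fragment in s.split("\n")])
--     if len(s) == width: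
--         return s
--     if len(s) < width:
--         return (" " * (width - len(s))) + s
--     else:
--         wrapped = []
--         while len(s) >= width:
--             wrapped.append(s[0:width])
--             s = s[width:]
--         if len(s) > 0:
--             wrapped.append(pad_left(s, width))
--         return "\n".join(wrapped)
-- ===== SOURCE B (Python) =====
-- def _truncate(s, width):
--     truncated = False
--     if "\n" in s:
--         s = s[0, s.index("\n")]  # tuncate at the first newline
--         truncated = True
--     if len(s) > (width - 2):
--         s = s[0 : width - 2]
--         truncated = True
--     if truncated:
--         s += ".."
--     return s
--
-- def pad_left(s, width, truncate=False):
--     if truncate: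
--         s = _truncate(s, width)
--     result = []
--     for line in s.split("\n"):
--         while len(line) > width:
--             result.append(line[:width])
--             line = line[width:]
--         if len(line) == width:
--             result.append(line)
--         else:
--             result.append(" " * (width - len(line)) + line)
--     return "\n".join(result)
-- ===== Notes on version B (the rewrite author's own statement) =====
-- stated objective: simpler
-- what changed: Replaces A's recursion (recursive per-fragment pad_left calls plus a wrap loop that recurses again on the tail) with a single iterative pass: split on newlines once and build one flat result list with a while-loop per line, joined at the end; the _truncate helper is kept unchanged.
-- outside the precondition, e.g. on pad_left('\n', 0, False): A returns '\n', B returns '\n'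
import Mathlib
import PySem

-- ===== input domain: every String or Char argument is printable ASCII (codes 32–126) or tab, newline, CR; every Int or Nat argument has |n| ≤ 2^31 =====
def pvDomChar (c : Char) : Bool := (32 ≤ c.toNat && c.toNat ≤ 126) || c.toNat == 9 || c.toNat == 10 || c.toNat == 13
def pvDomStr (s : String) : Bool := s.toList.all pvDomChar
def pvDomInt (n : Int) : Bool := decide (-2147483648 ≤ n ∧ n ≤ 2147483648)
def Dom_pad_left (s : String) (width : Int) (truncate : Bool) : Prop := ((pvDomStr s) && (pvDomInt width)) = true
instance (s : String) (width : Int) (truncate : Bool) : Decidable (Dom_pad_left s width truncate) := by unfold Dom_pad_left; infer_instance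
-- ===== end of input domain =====

-- B replaces A's recursion with one iterative split/while-loop/join pass over the lines (same cost, simpler shape); the _truncate helper is shared unchanged.


-- ===== PORT A =====
-- _truncate, shared verbatim by both Pythons (B keeps the helper unchanged).
-- On the '"\n" in s' branch Python raises TypeError (s[0, s.index("\n")]); that input is
-- excluded by Pre_, and the port returns [] there.
def truncPy (cs : List Char) (width : Int) : List Char :=
  if PySem.Chars.isIn ['\n'] cs then []
  else
    let p : List Char × Bool :=
      if (cs.length : Int) > width - 2 then (PySem.List.slice cs (some 0) (some (width - 2)), true)
      else (cs, false)
    if p.2 then p.1 ++ ['.', '.'] else p.1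


-- the while loop of A's else branch (fuel makes the loop total; width ≤ 0 is excluded by Pre_)
def wrapA : Nat → List Char → Int → List (List Char) × List Char
  | 0, cs, _ => ([], cs)
  | fuel + 1, cs, width =>
    if (cs.length : Int) ≥ width then
      let p := wrapA fuel (PySem.List.slice cs (some width) none) width
      ((PySem.List.slice cs (some 0) (some width)) :: p.1, p.2)
    else ([], cs)


-- the recursive body of A's pad_left (fuel bounds the recursion depth, which is at most 3)
def padCoreA : Nat → List Char → Int → List Char
  | 0, _, _ => []
  | fuel + 1, cs, width =>
    if PySem.Chars.isIn ['\n'] cs then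
      PySem.Chars.join ['\n'] ((PySem.Chars.splitOn cs ['\n']).map (fun f => padCoreA fuel f width))
    else if (cs.length : Int) = width then cs
    else if (cs.length : Int) < width then List.replicate (width - (cs.length : Int)).toNat ' ' ++ cs
    else
      let p := wrapA (cs.length + 1) cs width
      let wrapped := if 0 < p.2.length then p.1 ++ [padCoreA fuel p.2 width] else p.1
      PySem.Chars.join ['\n'] wrapped


def pad_left (s : String) (width : Int) (truncate : Bool) : String :=
  let cs := if truncate then truncPy s.toList width else s.toList
  String.ofList (padCoreA (cs.length + 2) cs width)

-- ===== PORT B =====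
-- B's inner while loop: peel width-sized chunks while the line is strictly longer than width
def whileB : Nat → List Char → Int → List (List Char) → List (List Char) × List Char
  | 0, line, _, res => (res, line)
  | fuel + 1, line, width, res =>
    if (line.length : Int) > width then
      whileB fuel (PySem.List.slice line (some width) none) width
        (res ++ [PySem.List.slice line (some 0) (some width)])
    else (res, line)


def pad_left_alt (s : String) (width : Int) (truncate : Bool) : String :=
  let cs := if truncate then truncPy s.toList width else s.toList
  let res := (PySem.Chars.splitOn cs ['\n']).foldl
    (fun res line =>
      let p := whileB (line.length + 1) line width res
      if (p.2.length : Int) = width then p.1 ++ [p.2]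
      else p.1 ++ [List.replicate (width - (p.2.length : Int)).toNat ' ' ++ p.2]) []
  String.ofList (PySem.Chars.join ['\n'] res)

-- ===== PRECONDITION & SPEC =====
-- Pre_ excludes width ≤ 0 — there A diverges on every input except strings consisting solely of
-- newlines at width 0 (on which both A and B return the string unchanged) — and excludes
-- truncate = true with a newline in s, where A's _truncate raises TypeError.
def Pre_pad_left (s : String) (width : Int) (truncate : Bool) : Prop :=
  1 ≤ width ∧ (truncate = true → PySem.Str.isIn "\n" s = false)
instance (s : String) (width : Int) (truncate : Bool) : Decidable (Pre_pad_left s width truncate) := by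
  unfold Pre_pad_left; infer_instance
def pvWitness_pad_left : String × Int × Bool := ("hi there", 3, false)

def Spec_pad_left (s : String) (width : Int) (truncate : Bool) (out : String) : Prop := out = pad_left_alt s width truncate
instance (s : String) (width : Int) (truncate : Bool) (out : String) : Decidable (Spec_pad_left s width truncate out) := by unfold Spec_pad_left; infer_instance

-- ===== CLAIM (what is proved, stated in full; the proofs are below) =====
def Claim_equal_pad_left : Prop := ∀ (s : String) (width : Int) (truncate : Bool), Dom_pad_left s width truncate → Pre_pad_left s width truncate → Spec_pad_left s width truncate (pad_left s width truncate)

-- ===== LEMMAS AND PROOFS =====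

-- structural description of s.split("\n")
def nlSplit : List Char → List (List Char)
  | [] => [[]]
  | c :: r =>
    if c = '\n' then [] :: nlSplit r
    else
      match nlSplit r with
      | [] => [[c]]
      | f :: fs => (c :: f) :: fs

lemma nlSplit_ne_nil (cs : List Char) : nlSplit cs ≠ [] := by
  cases cs with
  | nil => simp [nlSplit]
  | cons c r =>
    simp only [nlSplit]
    split
    · simp
    · cases h : nlSplit r <;> simp

lemma splitOn_go_eq (fuel : Nat) : ∀ (l cur : List Char) (acc : List (List Char)),
    l.length ≤ fuel →
    PySem.Chars.splitOn.go ['\n'] fuel l cur acc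
      = acc.reverse ++ (match nlSplit l with
          | [] => [cur.reverse]
          | f :: fs => (cur.reverse ++ f) :: fs) := by
  induction fuel with
  | zero =>
    intro l cur acc h
    have : l = [] := by simpa using h
    subst this
    simp [PySem.Chars.splitOn.go, nlSplit]
  | succ n ih =>
    intro l cur acc h
    cases l with
    | nil => simp [PySem.Chars.splitOn.go, nlSplit]
    | cons c rest =>
      by_cases hc : c = '\n'
      · subst hc
        rw [PySem.Chars.splitOn.go]
        simp only [List.isPrefixOf, BEq.rfl, Bool.and_self, if_pos, List.length_cons,
          List.drop_succ_cons, List.length_nil, List.drop_zero]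
        rw [ih rest [] ((cur.reverse) :: acc) (by simpa using h)]
        simp only [nlSplit, if_true]
        cases hn : nlSplit rest with
        | nil => exact absurd hn (nlSplit_ne_nil rest)
        | cons f fs => simp
      · rw [PySem.Chars.splitOn.go]
        have hp : (['\n'].isPrefixOf (c :: rest)) = false := by
          simp [List.isPrefixOf]
          intro hcon
          exact hc (by simpa using hcon.symm)
        rw [hp]
        simp only [Bool.false_eq_true, if_false]
        rw [ih rest (c :: cur) acc (by simpa using Nat.le_of_succ_le_succ (by simpa using h))]
        simp only [nlSplit, if_neg hc]
        cases hn : nlSplit rest with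
        | nil => exact absurd hn (nlSplit_ne_nil rest)
        | cons f fs => simp

lemma splitOn_eq_nlSplit (cs : List Char) : PySem.Chars.splitOn cs ['\n'] = nlSplit cs := by
  rw [PySem.Chars.splitOn, splitOn_go_eq (cs.length + 1) cs [] [] (by omega)]
  cases hn : nlSplit cs with
  | nil => exact absurd hn (nlSplit_ne_nil cs)
  | cons f fs => simp

lemma nlSplit_no_nl {cs : List Char} : ∀ {f : List Char}, f ∈ nlSplit cs → '\n' ∉ f := by
  induction cs with
  | nil => intro f hf; simp [nlSplit] at hf; simp [hf]
  | cons c r ih =>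
    intro f hf
    by_cases hc : c = '\n'
    · subst hc
      simp [nlSplit] at hf
      rcases hf with h | h
      · simp [h]
      · exact ih h
    · simp only [nlSplit, if_neg hc] at hf
      cases hn : nlSplit r with
      | nil => exact absurd hn (nlSplit_ne_nil r)
      | cons g gs =>
        rw [hn] at hf
        simp only [List.mem_cons] at hf
        rcases hf with h | h
        · subst h
          intro hmem
          rcases List.mem_cons.mp hmem with h' | h'
          · exact hc h'.symm
          · exact ih (hn ▸ List.mem_cons_self) h'
        · exact ih (hn ▸ List.mem_cons_of_mem g h)

lemma nlSplit_of_no_nl {cs : List Char} (h : '\n' ∉ cs) : nlSplit cs = [cs] := by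
  induction cs with
  | nil => simp [nlSplit]
  | cons c r ih =>
    have hc : c ≠ '\n' := fun hc => h (hc ▸ List.mem_cons_self)
    have hr := ih (fun hm => h (List.mem_cons_of_mem c hm))
    simp [nlSplit, hc, hr]

def padShort (line : List Char) (width : Int) : List Char :=
  List.replicate (width - (line.length : Int)).toNat ' ' ++ line


-- B's output for a single newline-free line
def lineOut (line : List Char) (width : Int) : List (List Char) :=
  let p := whileB (line.length + 1) line width []
  if (p.2.length : Int) = width then p.1 ++ [p.2] else p.1 ++ [padShort p.2 width]

lemma slice0 (xs : List Char) {w : Int} (hw : 0 ≤ w) :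
    PySem.List.slice xs (some 0) (some w) = xs.take w.toNat := by
  rw [show (some w : Option Int) = some ((w.toNat : Nat) : Int) from by
        rw [Int.toNat_of_nonneg hw],
      show ((0:Int)) = ((0:Nat):Int) from rfl, PySem.List.slice_natCast]
  simp

lemma sliceW (xs : List Char) {w : Int} (hw : 0 ≤ w) :
    PySem.List.slice xs (some w) none = xs.drop w.toNat :=
  PySem.List.slice_from xs hw

lemma join_append (sep : List Char) (l₁ l₂ : List (List Char)) (h₁ : l₁ ≠ []) (h₂ : l₂ ≠ []) :
    PySem.Chars.join sep (l₁ ++ l₂) = PySem.Chars.join sep l₁ ++ sep ++ PySem.Chars.join sep l₂ := by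
  induction l₁ with
  | nil => exact absurd rfl h₁
  | cons a l ih =>
    cases l with
    | nil =>
      cases l₂ with
      | nil => exact absurd rfl h₂
      | cons b m => simp [PySem.Chars.join_cons_cons, PySem.Chars.join_singleton]
    | cons b l' =>
      have : ((a :: b :: l') ++ l₂) = a :: ((b :: l') ++ l₂) := rfl
      rw [this, show ((b :: l') ++ l₂) = b :: (l' ++ l₂) from rfl]
      rw [PySem.Chars.join_cons_cons, show (b : List Char) :: (l' ++ l₂) = (b :: l') ++ l₂ from rfl]
      rw [ih (by simp) , PySem.Chars.join_cons_cons]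
      simp [List.append_assoc]

lemma join_map_join (sep : List Char) (L : List (List (List Char))) (h : ∀ x ∈ L, x ≠ []) :
    PySem.Chars.join sep (L.map (PySem.Chars.join sep)) = PySem.Chars.join sep L.flatten := by
  induction L with
  | nil => simp
  | cons x L' ih =>
    cases L' with
    | nil => simp [PySem.Chars.join_singleton]
    | cons y R =>
      have hx : x ≠ [] := h x List.mem_cons_self
      have hmem : ∀ z ∈ y :: R, z ≠ [] := fun z hz => h z (List.mem_cons_of_mem x hz)
      have hflat : (y :: R).flatten ≠ [] := by
        intro hc
        rw [List.flatten_eq_nil_iff] at hc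
        exact hmem y List.mem_cons_self (hc y List.mem_cons_self)
      have hmapne : (List.map (PySem.Chars.join sep) (y :: R)) ≠ [] := by simp
      have step1 : (x :: y :: R).map (PySem.Chars.join sep)
          = [PySem.Chars.join sep x] ++ (y :: R).map (PySem.Chars.join sep) := by simp
      rw [step1, join_append sep _ _ (by simp) hmapne, PySem.Chars.join_singleton,
        ih hmem, show (x :: y :: R).flatten = x ++ (y :: R).flatten from rfl,
        join_append sep x _ hx hflat]

lemma whileB_acc (fuel : Nat) : ∀ (line : List Char) (width : Int) (res : List (List Char)),
    whileB fuel line width res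
      = (res ++ (whileB fuel line width []).1, (whileB fuel line width []).2) := by
  induction fuel with
  | zero => intro line width res; simp [whileB]
  | succ n ih =>
    intro line width res
    by_cases hlt : (line.length : Int) > width
    · simp only [whileB, if_pos hlt]
      rw [ih _ width (res ++ [PySem.List.slice line (some 0) (some width)]),
          ih _ width ([] ++ [PySem.List.slice line (some 0) (some width)])]
      simp
    · simp [whileB, if_neg hlt]

-- the remainder of A's wrap loop: a suffix of the line, shorter than width
lemma wrapA_rest (width : Int) (hw : 1 ≤ width) (fuel : Nat) :
    ∀ line : List Char, line.length ≤ fuel →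
    (wrapA (fuel + 1) line width).2 <:+ line ∧
      ((wrapA (fuel + 1) line width).2.length : Int) < width := by
  induction fuel with
  | zero =>
    intro line h
    have hl : line = [] := by simpa using h
    subst hl
    have hcond : ¬ ((([] : List Char).length : Int) ≥ width) := by simp; omega
    simp only [wrapA, if_neg hcond]
    exact ⟨List.suffix_rfl, by simp; omega⟩
  | succ n ih =>
    intro line h
    by_cases hge : (line.length : Int) ≥ width
    · have hrec := ih (PySem.List.slice line (some width) none)
        (by rw [sliceW line (by omega)]; simp; omega)
      simp only [wrapA, if_pos hge]
      exact ⟨(hrec.1).trans (by rw [sliceW line (by omega)]; exact List.drop_suffix _ _), hrec.2⟩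
    · simp only [wrapA, if_neg hge]
      exact ⟨List.suffix_rfl, by omega⟩

lemma wrapA_succ (f : Nat) (cs : List Char) (width : Int) :
    wrapA (f + 1) cs width
      = if (cs.length : Int) ≥ width then
          ((PySem.List.slice cs (some 0) (some width))
              :: (wrapA f (PySem.List.slice cs (some width) none) width).1,
            (wrapA f (PySem.List.slice cs (some width) none) width).2)
        else ([], cs) := rfl

lemma whileB_succ (f : Nat) (cs : List Char) (width : Int) (res : List (List Char)) :
    whileB (f + 1) cs width res
      = if (cs.length : Int) > width then
          whileB f (PySem.List.slice cs (some width) none) width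
            (res ++ [PySem.List.slice cs (some 0) (some width)])
        else (res, cs) := rfl

lemma wrapA_nil (f : Nat) (width : Int) (hw : 1 ≤ width) :
    wrapA f ([] : List Char) width = ([], []) := by
  cases f with
  | zero => rfl
  | succ n => rw [wrapA_succ, if_neg (by simp; omega)]

lemma whileB_nil (f : Nat) (width : Int) (hw : 1 ≤ width) (res : List (List Char)) :
    whileB f ([] : List Char) width res = (res, []) := by
  cases f with
  | zero => rfl
  | succ n => rw [whileB_succ, if_neg (by simp; omega)]

lemma wrapA_fuel (width : Int) (hw : 1 ≤ width) (f : Nat) :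
    ∀ (g : Nat) (line : List Char), line.length ≤ f → line.length ≤ g →
    wrapA (f + 1) line width = wrapA (g + 1) line width := by
  induction f with
  | zero =>
    intro g line hf _
    have : line = [] := by simpa using hf
    subst this
    rw [wrapA_nil _ _ hw, wrapA_nil _ _ hw]
  | succ n ih =>
    intro g line hf hg
    cases g with
    | zero =>
      have : line = [] := by simpa using hg
      subst this
      rw [wrapA_nil _ _ hw, wrapA_nil _ _ hw]
    | succ m =>
      by_cases hge : (line.length : Int) ≥ width
      · rw [wrapA_succ (n + 1), wrapA_succ (m + 1), if_pos hge, if_pos hge,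
          ih m (PySem.List.slice line (some width) none)
            (by rw [sliceW line (by omega)]; simp; omega)
            (by rw [sliceW line (by omega)]; simp; omega)]
      · rw [wrapA_succ (n + 1), wrapA_succ (m + 1), if_neg hge, if_neg hge]

lemma whileB_fuel (width : Int) (hw : 1 ≤ width) (f : Nat) :
    ∀ (g : Nat) (line : List Char), line.length ≤ f → line.length ≤ g →
    whileB (f + 1) line width [] = whileB (g + 1) line width [] := by
  induction f with
  | zero =>
    intro g line hf _
    have : line = [] := by simpa using hf
    subst this
    rw [whileB_nil _ _ hw, whileB_nil _ _ hw]
  | succ n ih =>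
    intro g line hf hg
    cases g with
    | zero =>
      have : line = [] := by simpa using hg
      subst this
      rw [whileB_nil _ _ hw, whileB_nil _ _ hw]
    | succ m =>
      by_cases hgt : (line.length : Int) > width
      · rw [whileB_succ (n + 1), whileB_succ (m + 1), if_pos hgt, if_pos hgt,
          whileB_acc (n + 1), whileB_acc (m + 1),
          ih m (PySem.List.slice line (some width) none)
            (by rw [sliceW line (by omega)]; simp; omega)
            (by rw [sliceW line (by omega)]; simp; omega)]
      · rw [whileB_succ (n + 1), whileB_succ (m + 1), if_neg hgt, if_neg hgt]

def wrapOut (line : List Char) (width : Int) : List (List Char) :=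
  let p := wrapA (line.length + 1) line width
  if 0 < p.2.length then p.1 ++ [padShort p.2 width] else p.1

lemma EQaux (width : Int) (hw : 1 ≤ width) :
    ∀ (n : Nat) (line : List Char), line.length = n → width ≤ (n : Int) →
    wrapOut line width = lineOut line width := by
  intro n
  induction n using Nat.strong_induction_on with
  | _ n ih =>
    intro line hlen hwle
    subst hlen
    have hchunk : PySem.List.slice line (some 0) (some width) = line.take width.toNat :=
      slice0 line (by omega)
    have hdrop : PySem.List.slice line (some width) none = line.drop width.toNat :=
      sliceW line (by omega)
    by_cases heq : (line.length : Int) = width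
    · -- exact width: A peels the whole line then loops once more on []; B stops immediately
      have hk' : width.toNat = line.length := by omega
      rw [wrapOut, lineOut, wrapA_succ, whileB_succ,
        if_pos (show ((line.length : Int) ≥ width) from by omega),
        if_neg (show ¬ ((line.length : Int) > width) from by omega)]
      rw [hchunk, hdrop, hk', List.take_length, List.drop_length, wrapA_nil _ _ hw]
      simp [heq]
    · -- strictly longer than width: both peel one chunk and continue on the rest
      have hgt : width < (line.length : Int) := by omega
      obtain ⟨m, hm⟩ : ∃ m, line.length = m + 1 := ⟨line.length - 1, by omega⟩
      have hrle : (line.drop width.toNat).length ≤ m := by simp; omega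
      have hL : wrapOut line width
          = line.take width.toNat :: wrapOut (line.drop width.toNat) width := by
        rw [wrapOut, wrapOut]
        rw [show line.length + 1 = m + 1 + 1 from by omega, wrapA_succ (m + 1),
          if_pos (show ((line.length : Int) ≥ width) from by omega), hchunk, hdrop,
          wrapA_fuel width hw m ((line.drop width.toNat).length) (line.drop width.toNat) hrle (le_refl _)]
        by_cases h0 : 0 < (wrapA ((line.drop width.toNat).length + 1) (line.drop width.toNat) width).2.length
        · rw [if_pos h0, if_pos h0]; simp
        · rw [if_neg h0, if_neg h0]
      have hR : lineOut line width
          = line.take width.toNat :: lineOut (line.drop width.toNat) width := by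
        rw [lineOut, lineOut]
        rw [show line.length + 1 = m + 1 + 1 from by omega, whileB_succ (m + 1),
          if_pos (show ((line.length : Int) > width) from by omega), hchunk, hdrop,
          whileB_acc (m + 1),
          whileB_fuel width hw m ((line.drop width.toNat).length) (line.drop width.toNat) hrle (le_refl _)]
        by_cases h0 : ((whileB ((line.drop width.toNat).length + 1) (line.drop width.toNat) width []).2.length : Int) = width
        · rw [if_pos h0, if_pos h0]; simp
        · rw [if_neg h0, if_neg h0]; simp
      rw [hL, hR]
      by_cases hcase : width ≤ ((line.drop width.toNat).length : Int)
      · rw [ih (line.drop width.toNat).length (by omega) (line.drop width.toNat) rfl hcase]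
      · -- short nonempty rest: both sides are [padShort rest]
        have h1 : 1 ≤ (line.drop width.toNat).length := by simp; omega
        rw [wrapOut, lineOut, wrapA_succ, whileB_succ,
          if_neg (show ¬ (((line.drop width.toNat).length : Int) ≥ width) from by omega),
          if_neg (show ¬ (((line.drop width.toNat).length : Int) > width) from by omega)]
        rw [List.length_drop] at hcase h1
        rw [if_pos (show 0 < (([] : List (List Char)), line.drop width.toNat).2.length from
              by simp; omega),
            if_neg (show ¬ (((([] : List (List Char)), line.drop width.toNat).2.length : Int) = width) from
              by simp; omega)]


-- A's wrapped remainder: a suffix of the line, shorter than width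
lemma padCoreA_succ (fuel : Nat) (cs : List Char) (width : Int) :
    padCoreA (fuel + 1) cs width
      = if PySem.Chars.isIn ['\n'] cs then
          PySem.Chars.join ['\n'] ((PySem.Chars.splitOn cs ['\n']).map (fun f => padCoreA fuel f width))
        else if (cs.length : Int) = width then cs
        else if (cs.length : Int) < width then List.replicate (width - (cs.length : Int)).toNat ' ' ++ cs
        else
          PySem.Chars.join ['\n']
            (if 0 < (wrapA (cs.length + 1) cs width).2.length
             then (wrapA (cs.length + 1) cs width).1 ++ [padCoreA fuel (wrapA (cs.length + 1) cs width).2 width]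
             else (wrapA (cs.length + 1) cs width).1) := rfl

lemma isIn_false_of_not_mem {line : List Char} (h : '\n' ∉ line) :
    PySem.Chars.isIn ['\n'] line = false := by
  rw [PySem.Chars.isIn_eq_false_iff, List.singleton_infix_iff]
  exact h

lemma padCoreA_line (width : Int) (hw : 1 ≤ width) (fuel : Nat) (line : List Char)
    (hnl : '\n' ∉ line) :
    padCoreA (fuel + 2) line width = PySem.Chars.join ['\n'] (lineOut line width) := by
  have hni := isIn_false_of_not_mem hnl
  rw [show fuel + 2 = (fuel + 1) + 1 from rfl, padCoreA_succ, hni]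
  simp only [Bool.false_eq_true, if_false]
  by_cases heq : (line.length : Int) = width
  · rw [if_pos heq, lineOut, whileB_succ,
      if_neg (show ¬ ((line.length : Int) > width) from by omega),
      if_pos (show (((([] : List (List Char)), line)).2.length : Int) = width from by simpa using heq),
      List.nil_append, PySem.Chars.join_singleton]
  · rw [if_neg heq]
    by_cases hlt : (line.length : Int) < width
    · rw [if_pos hlt, lineOut, whileB_succ,
        if_neg (show ¬ ((line.length : Int) > width) from by omega),
        if_neg (show ¬ ((((([] : List (List Char)), line)).2.length : Int) = width) from by simpa using heq),
        List.nil_append, padShort, PySem.Chars.join_singleton]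
    · rw [if_neg hlt]
      have hge : width ≤ (line.length : Int) := by omega
      have hrest := wrapA_rest width hw line.length line (le_refl _)
      have hrpad : padCoreA (fuel + 1) (wrapA (line.length + 1) line width).2 width
          = padShort (wrapA (line.length + 1) line width).2 width := by
        have hnl' : '\n' ∉ (wrapA (line.length + 1) line width).2 :=
          fun hm => hnl (hrest.1.subset hm)
        rw [padCoreA_succ, isIn_false_of_not_mem hnl']
        simp only [Bool.false_eq_true, if_false]
        rw [if_neg (by omega), if_pos hrest.2, padShort]
      have := EQaux width hw line.length line rfl hge
      rw [wrapOut] at this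
      rw [← this]
      by_cases h0 : 0 < (wrapA (line.length + 1) line width).2.length
      · rw [if_pos h0, if_pos h0, hrpad]
      · rw [if_neg h0, if_neg h0]

lemma lineOut_ne_nil (line : List Char) (width : Int) : lineOut line width ≠ [] := by
  rw [lineOut]
  split <;> simp

lemma pad_left_eq_alt (s : String) (width : Int) (truncate : Bool) (hw : 1 ≤ width) :
    pad_left s width truncate = pad_left_alt s width truncate := by
  rw [pad_left, pad_left_alt]
  set cs := if truncate then truncPy s.toList width else s.toList with hcs
  -- B's fold builds the flatMap of the per-line outputs
  have hbody : ((PySem.Chars.splitOn cs ['\n']).foldl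
      (fun res line =>
        let p := whileB (line.length + 1) line width res
        if (p.2.length : Int) = width then p.1 ++ [p.2]
        else p.1 ++ [List.replicate (width - (p.2.length : Int)).toNat ' ' ++ p.2]) [])
      = (PySem.Chars.splitOn cs ['\n']).flatMap (fun line => lineOut line width) := by
    have hfun : (fun (res : List (List Char)) (line : List Char) =>
        let p := whileB (line.length + 1) line width res
        if (p.2.length : Int) = width then p.1 ++ [p.2]
        else p.1 ++ [List.replicate (width - (p.2.length : Int)).toNat ' ' ++ p.2])
        = (fun res line => res ++ lineOut line width) := by
      funext res line
      show (let p := whileB (line.length + 1) line width res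
        if (p.2.length : Int) = width then p.1 ++ [p.2]
        else p.1 ++ [List.replicate (width - (p.2.length : Int)).toNat ' ' ++ p.2])
        = res ++ lineOut line width
      rw [whileB_acc (line.length + 1) line width res, lineOut]
      by_cases h0 : (((whileB (line.length + 1) line width []).2.length : Int) = width)
      · rw [if_pos h0, if_pos h0, List.append_assoc]
      · rw [if_neg h0, if_neg h0, padShort, List.append_assoc]
    rw [hfun, PySem.List.foldl_append_eq_flatMap, List.nil_append]
  rw [hbody]
  by_cases hnl : '\n' ∈ cs
  · -- the string does contain newlines: A recurses over the same split
    have h1 : 1 ≤ cs.length := List.length_pos_of_mem hnl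
    have hin : PySem.Chars.isIn ['\n'] cs = true := by
      rw [PySem.Chars.isIn_iff_infix, List.singleton_infix_iff]; exact hnl
    rw [show cs.length + 2 = (cs.length + 1) + 1 from rfl, padCoreA_succ, hin, if_pos rfl]
    have hmap : (PySem.Chars.splitOn cs ['\n']).map (fun f => padCoreA (cs.length + 1) f width)
        = ((PySem.Chars.splitOn cs ['\n']).map (fun line => lineOut line width)).map
            (PySem.Chars.join ['\n']) := by
      rw [List.map_map]
      refine List.map_congr_left ?_
      intro f hf
      have hfn : '\n' ∉ f := by
        rw [splitOn_eq_nlSplit] at hf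
        exact nlSplit_no_nl hf
      rw [show cs.length + 1 = (cs.length - 1) + 2 from by omega, padCoreA_line width hw _ f hfn]
      rfl
    have hne : ∀ x ∈ (PySem.Chars.splitOn cs ['\n']).map (fun line => lineOut line width), x ≠ [] := by
      intro x hx
      rw [List.mem_map] at hx
      obtain ⟨line, -, hline⟩ := hx
      rw [← hline]
      exact lineOut_ne_nil line width
    rw [hmap, join_map_join _ _ hne, ← List.flatMap_def]
  · -- no newline: the split is the single line cs
    have hsingle : PySem.Chars.splitOn cs ['\n'] = [cs] := by
      rw [splitOn_eq_nlSplit, nlSplit_of_no_nl hnl]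
    rw [hsingle, show ([cs].flatMap (fun line => lineOut line width)) = lineOut cs width from by simp,
      padCoreA_line width hw cs.length cs hnl]

-- ===== VERDICT (by name: the statement is the Claim_ definition above) =====
theorem pad_left_spec : Claim_equal_pad_left := by
  intro s width truncate _ hpre
  unfold Spec_pad_left
  exact pad_left_eq_alt s width truncate hpre.1
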